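-- pv_equiv track=rewrite | github.com/microsoft/Model_Based_Testing_Using_LLMs | tester/bgp/rr_rmap/diff_testing.py | isPassed
-- ===== SOURCE A (Python) =====
-- def isPassed(result_list):
--     isRIB2_ref = result_list[0]["result"]["isRIB2"]
--     isRIB3_ref = result_list[0]["result"]["isRIB3"]
--
--     for result in result_list:
--         if result["result"]["isRIB2"] != isRIB2_ref:
--             return False
--         if result["result"]["isRIB3"] != isRIB3_ref:
--             return False
--     return True
-- ===== SOURCE B (Python) =====
-- def isPassed(result_list):
--     return all(
--         a["result"]["isRIB2"] == b["result"]["isRIB2"]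
--         and a["result"]["isRIB3"] == b["result"]["isRIB3"]
--         for a, b in zip(result_list, result_list[1:])
--     )
-- ===== Notes on version B (the rewrite author's own statement) =====
-- stated objective: alternative
-- what changed: Replaces A's reference-pair loop (read flags of element 0, compare every element's flags against them with early returns) with a reference-free transitive check: all() over zip(result_list, result_list[1:]) testing that each adjacent pair of results carries equal (isRIB2, isRIB3) flags.
import Mathlib
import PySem

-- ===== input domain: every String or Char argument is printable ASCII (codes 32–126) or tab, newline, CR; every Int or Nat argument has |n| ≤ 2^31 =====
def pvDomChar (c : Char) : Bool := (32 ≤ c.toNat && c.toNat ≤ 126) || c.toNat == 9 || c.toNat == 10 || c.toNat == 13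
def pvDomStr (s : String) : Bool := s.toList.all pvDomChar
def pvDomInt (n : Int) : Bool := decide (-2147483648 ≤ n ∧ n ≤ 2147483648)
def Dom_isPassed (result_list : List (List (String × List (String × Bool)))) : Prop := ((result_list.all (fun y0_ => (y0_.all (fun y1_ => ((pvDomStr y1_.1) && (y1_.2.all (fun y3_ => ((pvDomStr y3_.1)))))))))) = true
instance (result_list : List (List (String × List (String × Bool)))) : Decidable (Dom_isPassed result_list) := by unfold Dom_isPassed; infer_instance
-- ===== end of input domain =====

-- B replaces A's compare-everything-against-element-0 loop with a reference-free check that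
-- every ADJACENT pair of results carries equal flags (all over zip(lst, lst[1:])); same cost.

-- ===== PORT A =====
-- r["result"][k] for both ports; the default is never reached under Pre_isPassed
def pvFlag (r : List (String × List (String × Bool))) (k : String) : Bool :=
  PySem.Dict.getD (PySem.Dict.mk (PySem.Dict.getD (PySem.Dict.mk r) "result" [])) k false

-- the 'for result in result_list' loop with its two early returns
def pvLoopA (ref2 ref3 : Bool) : List (List (String × List (String × Bool))) → Bool
  | [] => true
  | r :: rest =>
    if pvFlag r "isRIB2" ≠ ref2 then false
    else if pvFlag r "isRIB3" ≠ ref3 then false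
    else pvLoopA ref2 ref3 rest

def isPassed (result_list : List (List (String × List (String × Bool)))) : Bool :=
  match result_list with
  | [] => false   -- Python raises IndexError here; excluded by Pre_isPassed
  | r0 :: _ =>
    let isRIB2_ref := pvFlag r0 "isRIB2"
    let isRIB3_ref := pvFlag r0 "isRIB3"
    pvLoopA isRIB2_ref isRIB3_ref result_list

-- ===== PORT B =====
-- all(a[..]==b[..] and a[..]==b[..] for a, b in zip(result_list, result_list[1:]))
def isPassed_alt (result_list : List (List (String × List (String × Bool)))) : Bool :=
  (result_list.zip (PySem.List.slice result_list (some 1) none)).all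
    (fun ab => (pvFlag ab.1 "isRIB2" == pvFlag ab.2 "isRIB2") &&
               (pvFlag ab.1 "isRIB3" == pvFlag ab.2 "isRIB3"))

-- ===== PRECONDITION & SPEC =====
-- Pre_ excludes exactly the inputs on which the Python A raises (IndexError on the empty
-- list, KeyError on a missing "result"/"isRIB2"/"isRIB3" key at an element A's short-circuit
-- actually reads): the head must carry both flags, and its maximal prefix of well-formed,
-- flag-matching elements must either be the whole list or be followed by an element whose
-- reads A completes before returning False.
def pvHas (r : List (String × List (String × Bool))) (k : String) : Bool :=
  match PySem.Dict.get? (PySem.Dict.mk r) "result" with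
  | none => false
  | some inner => (PySem.Dict.get? (PySem.Dict.mk inner) k).isSome

def pvWFElem (r : List (String × List (String × Bool))) : Bool :=
  pvHas r "isRIB2" && pvHas r "isRIB3"

def pvMatched (rp : Bool × Bool) (r : List (String × List (String × Bool))) : Bool :=
  pvWFElem r && ((pvFlag r "isRIB2", pvFlag r "isRIB3") == rp)

def pvFalseable (rp : Bool × Bool) (r : List (String × List (String × Bool))) : Bool :=
  pvHas r "isRIB2" &&
    ((pvFlag r "isRIB2" != rp.1) || (pvHas r "isRIB3" && (pvFlag r "isRIB3" != rp.2)))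

def pvPre (result_list : List (List (String × List (String × Bool)))) : Bool :=
  match result_list with
  | [] => false
  | r0 :: _ =>
    pvWFElem r0 &&
    (match result_list.dropWhile (pvMatched (pvFlag r0 "isRIB2", pvFlag r0 "isRIB3")) with
     | [] => true
     | r :: _ => pvFalseable (pvFlag r0 "isRIB2", pvFlag r0 "isRIB3") r)

def Pre_isPassed (result_list : List (List (String × List (String × Bool)))) : Prop :=
  pvPre result_list = true
instance (result_list : List (List (String × List (String × Bool)))) : Decidable (Pre_isPassed result_list) := by unfold Pre_isPassed; infer_instance

def pvWitness_isPassed : (List (List (String × List (String × Bool)))) :=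
  [[("result", [("isRIB2", true), ("isRIB3", false)])],
   [("result", [("isRIB2", true), ("isRIB3", false)])]]

def Spec_isPassed (result_list : List (List (String × List (String × Bool)))) (out : Bool) : Prop := out = isPassed_alt result_list
instance (result_list : List (List (String × List (String × Bool)))) (out : Bool) : Decidable (Spec_isPassed result_list out) := by unfold Spec_isPassed; infer_instance

-- ===== CLAIM (what is proved, stated in full; the proofs are below) =====
def Claim_equal_isPassed : Prop := ∀ (result_list : List (List (String × List (String × Bool)))), Dom_isPassed result_list → Pre_isPassed result_list → Spec_isPassed result_list (isPassed result_list)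

-- ===== LEMMAS AND PROOFS =====

theorem pvLoopA_eq_true_iff (ref2 ref3 : Bool) (l : List (List (String × List (String × Bool)))) :
    pvLoopA ref2 ref3 l = true ↔
      ∀ r ∈ l, pvFlag r "isRIB2" = ref2 ∧ pvFlag r "isRIB3" = ref3 := by
  induction l with
  | nil => simp [pvLoopA]
  | cons r rest ih =>
    simp only [pvLoopA]
    by_cases h2 : pvFlag r "isRIB2" = ref2
    · by_cases h3 : pvFlag r "isRIB3" = ref3
      · simp [h2, h3, ih]
      · simp [h2, h3]
    · simp [h2]

theorem pvChain_iff (x : List (String × List (String × Bool)))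
    (l : List (List (String × List (String × Bool)))) :
    (((x :: l).zip l).all
      (fun ab => (pvFlag ab.1 "isRIB2" == pvFlag ab.2 "isRIB2") &&
                 (pvFlag ab.1 "isRIB3" == pvFlag ab.2 "isRIB3"))) = true ↔
      ∀ r ∈ l, pvFlag r "isRIB2" = pvFlag x "isRIB2" ∧ pvFlag r "isRIB3" = pvFlag x "isRIB3" := by
  induction l generalizing x with
  | nil => simp
  | cons y t ih =>
    simp only [List.zip_cons_cons, List.all_cons, Bool.and_eq_true, beq_iff_eq, ih y,
      List.mem_cons, forall_eq_or_imp]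
    constructor
    · rintro ⟨⟨h2, h3⟩, ht⟩
      refine ⟨⟨h2.symm, h3.symm⟩, fun r hr => ?_⟩
      have := ht r hr
      exact ⟨this.1.trans h2.symm, this.2.trans h3.symm⟩
    · rintro ⟨⟨h2, h3⟩, ht⟩
      refine ⟨⟨h2.symm, h3.symm⟩, fun r hr => ?_⟩
      have := ht r hr
      exact ⟨this.1.trans h2.symm, this.2.trans h3.symm⟩

theorem isPassed_eq_alt (result_list : List (List (String × List (String × Bool))))
    (hne : result_list ≠ []) : isPassed result_list = isPassed_alt result_list := by
  obtain ⟨r0, rest, rfl⟩ := List.exists_cons_of_ne_nil hne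
  simp only [isPassed, isPassed_alt, PySem.List.slice_from_one, List.tail_cons]
  rw [Bool.eq_iff_iff, pvLoopA_eq_true_iff, pvChain_iff]
  constructor
  · intro h r hr
    exact h r (List.mem_cons_of_mem _ hr)
  · intro h r hr
    rcases List.mem_cons.mp hr with rfl | hr
    · exact ⟨rfl, rfl⟩
    · exact h r hr

-- ===== VERDICT (by name: the statement is the Claim_ definition above) =====
theorem isPassed_spec : Claim_equal_isPassed := by
  intro result_list _ hpre
  have hne : result_list ≠ [] := by
    intro h; subst h; exact absurd hpre (by simp [Pre_isPassed, pvPre])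
  exact isPassed_eq_alt result_list hne
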